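-- pv_equiv track=rewrite | github.com/76778920-tech/calzatura-vilchez-v3 | generate_pdf.py | calc_spans
-- ===== SOURCE A (Python) =====
-- def calc_spans(keys):
--     """Calcula {índice_inicio: cantidad} para grupos de claves consecutivas iguales."""
--     spans = {}
--     n = len(keys)
--     if n == 0:
--         return spans
--     start = 0
--     prev = keys[0]
--     for i in range(1, n):
--         if keys[i] != prev:
--             spans[start] = i - start
--             prev = keys[i]
--             start = i
--     spans[start] = n - start
--     return spans
-- ===== SOURCE B (Python) =====
-- def calc_spans(keys):
--     """Calcula {índice_inicio: cantidad} para grupos de claves consecutivas iguales."""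
--     n = len(keys)
--     starts = [i for i in range(n) if i == 0 or keys[i] != keys[i - 1]] + [n]
--     return {s: e - s for s, e in zip(starts, starts[1:])}
-- ===== Notes on version B (the rewrite author's own statement) =====
-- stated objective: alternative
-- what changed: Instead of A's single stateful prev/start loop that emits spans as it scans, B works in two staged passes: it first materialises the list of run-boundary indices (an index is a boundary iff it is 0 or differs from its predecessor), appends the sentinel n, and then pairs adjacent boundaries with zip to get each span as a difference of consecutive boundaries.
import Mathlib
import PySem

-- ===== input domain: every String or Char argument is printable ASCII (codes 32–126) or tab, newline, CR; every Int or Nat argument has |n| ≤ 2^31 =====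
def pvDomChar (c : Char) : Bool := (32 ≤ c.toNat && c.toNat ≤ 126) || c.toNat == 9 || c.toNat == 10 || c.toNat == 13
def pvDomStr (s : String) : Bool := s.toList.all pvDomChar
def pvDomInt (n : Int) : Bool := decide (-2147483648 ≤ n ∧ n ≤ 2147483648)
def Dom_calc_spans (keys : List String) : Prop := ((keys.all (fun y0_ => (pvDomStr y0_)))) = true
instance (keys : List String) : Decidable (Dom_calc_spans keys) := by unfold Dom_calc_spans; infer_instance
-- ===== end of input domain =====

-- B replaces A's single stateful prev/start scan by two staged passes: first the list of
-- run-boundary indices plus a sentinel n, then adjacent-pair differences via zip; objective: alternative.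

-- ===== PORT A =====
-- literal transliteration of A: dict spans, index loop over range(1, n) comparing to prev
def calc_spans (keys : List String) : List (Int × Int) :=
  let spans : PySem.Dict Int Int := PySem.Dict.empty
  let n : Int := (keys.length : Int)
  if n = 0 then spans.items
  else
    let start : Int := 0
    let prev : String := PySem.List.pyGetD keys 0 ""   -- keys[0]; in range since n ≠ 0
    let st := (PySem.List.pyRange 1 n 1).foldl
        (fun (s : PySem.Dict Int Int × Int × String) i =>
          let ki := PySem.List.pyGetD keys i ""        -- keys[i]; 1 ≤ i < n so in range
          if ki ≠ s.2.2 then (s.1.insert s.2.1 (i - s.2.1), i, ki)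
          else s)
        (spans, start, prev)
    (st.1.insert st.2.1 (n - st.2.1)).items

-- ===== PORT B =====
-- literal transliteration of Source B: boundary-index comprehension + sentinel, then the
-- dict comprehension over zip(starts, starts[1:]); all indexed accesses are in range
-- when evaluated (the 'i == 0 ||' short-circuit guards keys[i-1], as in Python's 'or')
def calc_spans_alt (keys : List String) : List (Int × Int) :=
  let n : Int := (keys.length : Int)
  let starts : List Int :=
    ((PySem.List.pyRange 0 n 1).filter
      (fun i => i == 0 || decide (PySem.List.pyGetD keys i "" ≠ PySem.List.pyGetD keys (i - 1) "")))
      ++ [n]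
  ((starts.zip (PySem.List.slice starts (some 1) none)).foldl
      (fun (d : PySem.Dict Int Int) p => d.insert p.1 (p.2 - p.1)) PySem.Dict.empty).items

-- ===== PRECONDITION & SPEC =====
def Spec_calc_spans (keys : List String) (out : List (Int × Int)) : Prop := out = calc_spans_alt keys
instance (keys : List String) (out : List (Int × Int)) : Decidable (Spec_calc_spans keys out) := by unfold Spec_calc_spans; infer_instance

-- ===== CLAIM (what is proved, stated in full; the proofs are below) =====
def Claim_equal_calc_spans : Prop := ∀ (keys : List String), Dom_calc_spans keys → Spec_calc_spans keys (calc_spans keys)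

-- ===== LEMMAS AND PROOFS =====

-- abstract form of A's loop-plus-final-insert output, recursing on the unseen suffix
def gSpans (start i : Int) (prev : String) : List String → List (Int × Int)
  | [] => [(start, i - start)]
  | y :: ys => if y ≠ prev then (start, i - start) :: gSpans i (i + 1) y ys
               else gSpans start (i + 1) prev ys

-- abstract form of B's boundary list beyond index 0, recursing on the unseen suffix
def gBounds (i : Int) (prev : String) : List String → List Int
  | [] => []
  | y :: ys => if y ≠ prev then i :: gBounds (i + 1) y ys
               else gBounds (i + 1) prev ys

-- adjacent-pair differences
def adj : List Int → List (Int × Int)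
  | a :: b :: t => (a, b - a) :: adj (b :: t)
  | _ => []

-- the loop body of A's port, with keys fixed
def aBody (keys : List String) (s : PySem.Dict Int Int × Int × String) (i : Int) :
    PySem.Dict Int Int × Int × String :=
  let ki := PySem.List.pyGetD keys i ""
  if ki ≠ s.2.2 then (s.1.insert s.2.1 (i - s.2.1), i, ki) else s

theorem loop_eq (rest : List String) : ∀ (pre : List String) (d : PySem.Dict Int Int)
    (start : Int) (prev : String),
    (∀ k ∈ d.keys, k < start) → d.keys.Nodup → start < (pre.length : Int) →
    (let st := (PySem.List.pyRange (pre.length : Int) ((pre ++ rest).length : Int) 1).foldl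
        (aBody (pre ++ rest)) (d, start, prev)
     (st.1.insert st.2.1 (((pre ++ rest).length : Int) - st.2.1)).items) =
      d.items ++ gSpans start (pre.length : Int) prev rest := by
  induction rest with
  | nil =>
    intro pre d start prev hlt hnd hs
    simp only [List.append_nil]
    rw [PySem.List.pyRange_one_eq_nil (le_refl _)]
    simp only [List.foldl_nil]
    rw [PySem.Dict.items_insert_of_not_contains]
    · simp [gSpans]
    · rw [PySem.Dict.contains_eq_decide_mem_keys]
      simp only [decide_eq_false_iff_not]
      intro hmem; exact absurd (hlt _ hmem) (lt_irrefl _)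
  | cons y ys ih =>
    intro pre d start prev hlt hnd hs
    have hget : PySem.List.pyGetD (pre ++ y :: ys) (pre.length : Int) "" = y := by
      rw [PySem.List.pyGetD_natCast]
      simp [List.getD]
    have hcons : PySem.List.pyRange (pre.length : Int) (((pre ++ y :: ys).length : Int)) 1
        = (pre.length : Int) :: PySem.List.pyRange ((pre.length : Int) + 1) (((pre ++ y :: ys).length : Int)) 1 := by
      apply PySem.List.pyRange_one_cons
      simp
    rw [hcons, List.foldl_cons]
    have hlen : ((pre ++ [y]).length : Int) = (pre.length : Int) + 1 := by simp
    by_cases h : y = prev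
    · -- same run: state unchanged
      have hb : aBody (pre ++ y :: ys) (d, start, prev) (pre.length : Int) = (d, start, prev) := by
        simp [aBody, h]
      rw [hb]
      have hrec := ih (pre ++ [y]) d start prev hlt hnd (by rw [hlen]; omega)
      simp only [List.append_assoc, List.cons_append, List.nil_append] at hrec
      rw [hlen] at hrec
      rw [hrec]
      rw [show gSpans start (pre.length : Int) prev (y :: ys)
            = gSpans start ((pre.length : Int) + 1) prev ys from by simp [gSpans, h]]
    · -- new run: emit span, reset start/prev
      have hb : aBody (pre ++ y :: ys) (d, start, prev) (pre.length : Int)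
          = (d.insert start ((pre.length : Int) - start), (pre.length : Int), y) := by
        simp [aBody, hget, h]
      rw [hb]
      have hnc : d.contains start = false := by
        rw [PySem.Dict.contains_eq_decide_mem_keys]
        simp only [decide_eq_false_iff_not]
        intro hmem; exact absurd (hlt _ hmem) (lt_irrefl _)
      have hlt2 : ∀ k ∈ (d.insert start ((pre.length : Int) - start)).keys, k < (pre.length : Int) := by
        intro k hk
        rcases (PySem.Dict.mem_keys_insert _ _ _ _).mp hk with h1 | h1
        · omega
        · have := hlt _ h1; omega
      have hnd2 : (d.insert start ((pre.length : Int) - start)).keys.Nodup :=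
        PySem.Dict.nodup_keys_insert _ _ _ hnd
      have hrec := ih (pre ++ [y]) (d.insert start ((pre.length : Int) - start)) (pre.length : Int) y
        hlt2 hnd2 (by rw [hlen]; omega)
      simp only [List.append_assoc, List.cons_append, List.nil_append] at hrec
      rw [hlen] at hrec
      rw [hrec]
      rw [PySem.Dict.items_insert_of_not_contains _ _ hnc]
      rw [show gSpans start (pre.length : Int) prev (y :: ys)
            = (start, (pre.length : Int) - start) :: gSpans (pre.length : Int) ((pre.length : Int) + 1) y ys from by
        simp [gSpans, h]]
      simp

-- B's filter of the index range beyond 0 computes gBounds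
theorem filter_eq (rest : List String) : ∀ (pre : List String) (prev : String),
    1 ≤ pre.length →
    PySem.List.pyGetD (pre ++ rest) ((pre.length : Int) - 1) "" = prev →
    (PySem.List.pyRange (pre.length : Int) ((pre ++ rest).length : Int) 1).filter
      (fun i => i == 0 || decide (PySem.List.pyGetD (pre ++ rest) i ""
                                   ≠ PySem.List.pyGetD (pre ++ rest) (i - 1) ""))
      = gBounds (pre.length : Int) prev rest := by
  induction rest with
  | nil =>
    intro pre prev hpre hprev
    simp only [List.append_nil]
    rw [PySem.List.pyRange_one_eq_nil (le_refl _)]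
    simp [gBounds]
  | cons y ys ih =>
    intro pre prev hpre hprev
    have hget : PySem.List.pyGetD (pre ++ y :: ys) (pre.length : Int) "" = y := by
      rw [PySem.List.pyGetD_natCast]
      simp [List.getD]
    have hcons : PySem.List.pyRange (pre.length : Int) (((pre ++ y :: ys).length : Int)) 1
        = (pre.length : Int) :: PySem.List.pyRange ((pre.length : Int) + 1) (((pre ++ y :: ys).length : Int)) 1 := by
      apply PySem.List.pyRange_one_cons
      simp
    rw [hcons, List.filter_cons]
    have hz : (((pre.length : Int) == 0) : Bool) = false := by
      simp only [beq_eq_false_iff_ne, ne_eq]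
      omega
    have hlen : ((pre ++ [y]).length : Int) = (pre.length : Int) + 1 := by simp
    have hprev' : PySem.List.pyGetD ((pre ++ [y]) ++ ys) (((pre ++ [y]).length : Int) - 1) "" = y := by
      rw [hlen]
      simp only [List.append_assoc, List.cons_append, List.nil_append, add_sub_cancel_right]
      exact hget
    have hrec := ih (pre ++ [y]) y (by simp) hprev'
    simp only [List.append_assoc, List.cons_append, List.nil_append] at hrec
    rw [hlen] at hrec
    by_cases h : y = prev
    · have hcond : (((pre.length : Int) == 0) ||
          decide (PySem.List.pyGetD (pre ++ y :: ys) (pre.length : Int) ""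
            ≠ PySem.List.pyGetD (pre ++ y :: ys) ((pre.length : Int) - 1) "")) = false := by
        rw [hz, hget, hprev, h]
        simp
      rw [hcond]
      simp only [if_false, Bool.false_eq_true]
      rw [hrec]
      rw [show gBounds (pre.length : Int) prev (y :: ys)
            = gBounds ((pre.length : Int) + 1) prev ys from by simp [gBounds, h]]
      rw [h]
    · have hcond : (((pre.length : Int) == 0) ||
          decide (PySem.List.pyGetD (pre ++ y :: ys) (pre.length : Int) ""
            ≠ PySem.List.pyGetD (pre ++ y :: ys) ((pre.length : Int) - 1) "")) = true := by
        rw [hz, hget, hprev]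
        simp [h]
      rw [hcond]
      simp only [if_true]
      rw [hrec]
      rw [show gBounds (pre.length : Int) prev (y :: ys)
            = (pre.length : Int) :: gBounds ((pre.length : Int) + 1) y ys from by simp [gBounds, h]]

-- every boundary produced by gBounds lies in [i, i + rest.length)
theorem gBounds_mem_bounds (rest : List String) : ∀ (i : Int) (prev : String) (j : Int),
    j ∈ gBounds i prev rest → i ≤ j ∧ j < i + (rest.length : Int) := by
  induction rest with
  | nil => intro i prev j hj; simp [gBounds] at hj
  | cons y ys ih =>
    intro i prev j hj
    simp only [gBounds] at hj
    split_ifs at hj with h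
    · rcases List.mem_cons.mp hj with rfl | hj'
      · simp only [List.length_cons]
        push_cast
        omega
      · have := ih (i + 1) y j hj'
        simp only [List.length_cons]
        push_cast
        omega
    · have := ih (i + 1) prev j hj
      simp only [List.length_cons]
      push_cast
      omega

-- gBounds is strictly increasing
theorem gBounds_pairwise (rest : List String) : ∀ (i : Int) (prev : String),
    (gBounds i prev rest).Pairwise (· < ·) := by
  induction rest with
  | nil => intro i prev; simp [gBounds]
  | cons y ys ih =>
    intro i prev
    simp only [gBounds]
    split_ifs with h
    · refine List.pairwise_cons.mpr ⟨?_, ih (i + 1) y⟩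
      intro j hj
      have := gBounds_mem_bounds ys (i + 1) y j hj
      omega
    · exact ih (i + 1) prev

-- zip with the tail, mapped to differences, is adjacent-pair differences
theorem zip_tail_adj (l : List Int) :
    (l.zip l.tail).map (fun p => (p.1, p.2 - p.1)) = adj l := by
  induction l with
  | nil => simp [adj]
  | cons a t ih =>
    cases t with
    | nil => simp [adj]
    | cons b t' =>
      simp only [List.tail_cons, List.zip_cons_cons, List.map_cons]
      rw [show ((b :: t').zip t').map (fun p : Int × Int => (p.1, p.2 - p.1))
            = ((b :: t').zip (b :: t').tail).map (fun p : Int × Int => (p.1, p.2 - p.1)) from rfl]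
      rw [ih]
      simp [adj]

-- the first components of adj l form l.dropLast
theorem adj_map_fst (l : List Int) : (adj l).map Prod.fst = l.dropLast := by
  induction l with
  | nil => simp [adj]
  | cons a t ih =>
    cases t with
    | nil => simp [adj]
    | cons b t' =>
      simp only [adj, List.map_cons]
      rw [ih]
      simp

-- folding insert over pairs with nodup keys, all fresh, appends them to the items
theorem foldl_insert_items (ps : List (Int × Int)) : ∀ (d : PySem.Dict Int Int),
    (ps.map Prod.fst).Nodup → (∀ q ∈ ps, q.1 ∉ d.keys) → d.keys.Nodup →
    (ps.foldl (fun d p => d.insert p.1 p.2) d).items = d.items ++ ps := by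
  induction ps with
  | nil => intro d _ _ _; simp
  | cons p ps ih =>
    intro d hnd hfresh hdk
    simp only [List.map_cons, List.nodup_cons] at hnd
    have hnc : d.contains p.1 = false := by
      rw [PySem.Dict.contains_eq_decide_mem_keys]
      simp only [decide_eq_false_iff_not]
      exact hfresh p (List.mem_cons_self) 
    simp only [List.foldl_cons]
    rw [ih (d.insert p.1 p.2) hnd.2 ?_ (PySem.Dict.nodup_keys_insert _ _ _ hdk)]
    · rw [PySem.Dict.items_insert_of_not_contains _ _ hnc]
      simp
    · intro q hq hmem
      rcases (PySem.Dict.mem_keys_insert _ _ _ _).mp hmem with h1 | h1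
      · exact hnd.1 (h1 ▸ List.mem_map_of_mem hq)
      · exact hfresh q (List.mem_cons_of_mem _ hq) h1

-- pairing the boundaries (with sentinel) gives exactly A's abstract spans
theorem adj_gBounds (rest : List String) : ∀ (prev : String) (s i : Int),
    adj (s :: gBounds i prev rest ++ [i + (rest.length : Int)]) = gSpans s i prev rest := by
  induction rest with
  | nil => intro prev s i; simp [gBounds, gSpans, adj]
  | cons y ys ih =>
    intro prev s i
    by_cases h : y = prev
    · rw [show gBounds i prev (y :: ys) = gBounds (i + 1) prev ys from by simp [gBounds, h]]
      rw [show gSpans s i prev (y :: ys) = gSpans s (i + 1) prev ys from by simp [gSpans, h]]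
      rw [show i + ((y :: ys).length : Int) = (i + 1) + (ys.length : Int) from by simp; ring]
      exact ih prev s (i + 1)
    · rw [show gBounds i prev (y :: ys) = i :: gBounds (i + 1) y ys from by simp [gBounds, h]]
      rw [show gSpans s i prev (y :: ys)
            = (s, i - s) :: gSpans i (i + 1) y ys from by simp [gSpans, h]]
      rw [show i + ((y :: ys).length : Int) = (i + 1) + (ys.length : Int) from by simp; ring]
      rw [show (s :: i :: gBounds (i + 1) y ys ++ [(i + 1) + (ys.length : Int)])
            = s :: (i :: gBounds (i + 1) y ys ++ [(i + 1) + (ys.length : Int)]) from rfl]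
      rw [show adj (s :: (i :: gBounds (i + 1) y ys ++ [(i + 1) + (ys.length : Int)]))
            = (s, i - s) :: adj (i :: gBounds (i + 1) y ys ++ [(i + 1) + (ys.length : Int)]) from by
        simp [adj]]
      rw [ih y i (i + 1)]

-- the boundary list of a nonempty keys is 0 :: gBounds 1 k0 ks ++ [n]
theorem starts_pairwise (k0 : String) (ks : List String) :
    ((0 : Int) :: gBounds 1 k0 ks ++ [1 + (ks.length : Int)]).Pairwise (· < ·) := by
  refine List.pairwise_cons.mpr ⟨?_, ?_⟩
  · intro j hj
    rcases List.mem_append.mp hj with h1 | h1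
    · have := gBounds_mem_bounds ks 1 k0 j h1; omega
    · simp only [List.mem_singleton] at h1; omega
  · refine List.pairwise_append.mpr ⟨gBounds_pairwise ks 1 k0, by simp, ?_⟩
    intro j hj m hm
    simp only [List.mem_singleton] at hm
    have := gBounds_mem_bounds ks 1 k0 j hj
    omega

-- B's port computes the abstract spans of the boundary pairing
theorem alt_eq (keys : List String) :
    calc_spans_alt keys =
      (match keys with
       | [] => []
       | k0 :: ks => gSpans 0 1 k0 ks) := by
  cases keys with
  | nil => decide
  | cons k0 ks =>
    unfold calc_spans_alt
    simp only [List.length_cons, Nat.cast_add, Nat.cast_one]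
    rw [PySem.List.pyRange_one_cons (by positivity)]
    rw [List.filter_cons]
    rw [show (((0 : Int) == 0) || decide (PySem.List.pyGetD (k0 :: ks) 0 ""
          ≠ PySem.List.pyGetD (k0 :: ks) (0 - 1) "")) = true from by simp]
    simp only [if_true]
    have hfil0 := filter_eq ks [k0] k0 (by simp)
      (by simp only [List.length_cons, List.length_nil, List.singleton_append]
          norm_num)
    have hfil : List.filter
        (fun i => i == 0 || decide (PySem.List.pyGetD (k0 :: ks) i ""
                              ≠ PySem.List.pyGetD (k0 :: ks) (i - 1) ""))
        (PySem.List.pyRange 1 (1 + (ks.length : Int)) 1) = gBounds 1 k0 ks := by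
      have h2 : ((([k0] ++ ks).length : Int)) = 1 + (ks.length : Int) := by simp; omega
      rw [← h2]
      exact hfil0
    rw [show ((ks.length : Int) + 1) = 1 + (ks.length : Int) from by omega]
    simp only [zero_add]
    rw [hfil]
    rw [PySem.List.slice_from_one]
    set starts : List Int := (0 : Int) :: gBounds 1 k0 ks ++ [1 + (ks.length : Int)] with hstarts
    have hmap : (starts.zip starts.tail).foldl
        (fun (d : PySem.Dict Int Int) p => d.insert p.1 (p.2 - p.1)) PySem.Dict.empty
        = ((starts.zip starts.tail).map (fun p => (p.1, p.2 - p.1))).foldl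
            (fun (d : PySem.Dict Int Int) q => d.insert q.1 q.2) PySem.Dict.empty := by
      rw [List.foldl_map]
    rw [hmap, zip_tail_adj]
    have hnodup : ((adj starts).map Prod.fst).Nodup := by
      rw [adj_map_fst]
      exact ((starts_pairwise k0 ks).sublist (List.dropLast_sublist _)).imp ne_of_lt
    rw [foldl_insert_items (adj starts) PySem.Dict.empty hnodup
        (by intro q _ hq; simp [PySem.Dict.empty, PySem.Dict.keys] at hq)
        (by simp [PySem.Dict.empty, PySem.Dict.keys])]
    rw [hstarts, adj_gBounds ks k0 0 1]
    simp [PySem.Dict.empty]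

-- ===== VERDICT (by name: the statement is the Claim_ definition above) =====
theorem calc_spans_spec : Claim_equal_calc_spans := by
  intro keys _
  unfold Spec_calc_spans
  rw [alt_eq]
  unfold calc_spans
  cases keys with
  | nil => simp [PySem.Dict.empty]
  | cons k0 ks =>
    simp only [List.length_cons, Nat.cast_add, Nat.cast_one]
    rw [if_neg (by positivity)]
    rw [PySem.List.pyGetD_zero_cons]
    have hloop := loop_eq ks [k0] PySem.Dict.empty 0 k0
      (by simp [PySem.Dict.keys_empty]) (by simp [PySem.Dict.keys_empty]) (by simp)
    simp only [List.singleton_append, Nat.cast_one, List.length_cons,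
      Nat.cast_add, List.length_nil, zero_add] at hloop
    have hbody : (fun (s : PySem.Dict Int Int × Int × String) i =>
        let ki := PySem.List.pyGetD (k0 :: ks) i ""
        if ki ≠ s.2.2 then (s.1.insert s.2.1 (i - s.2.1), i, ki) else s)
        = aBody (k0 :: ks) := rfl
    rw [hbody, hloop]
    simp [PySem.Dict.empty]
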